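-- pv_equiv track=rewrite | github.com/GavenHwang/pythonPractice | 00_practice/solution/solution_01.py | max_aeiou
-- ===== SOURCE A (Python) =====
-- def max_aeiou(s):
--     result = ''
--     for i in range(len(s) - 1):
--         if s[i] not in 'aeiouAEIOU':
--             continue
--         for j in range(i + 1, len(s)):
--             if s[j] in 'aeiouAEIOU':
--                 if len(s[i:j + 1]) > len(result):
--                     result = s[i:j + 1]
--             else:
--                 break
--     return result
-- ===== SOURCE B (Python) =====
-- def max_aeiou(s):
--     # one pass: grow the current vowel run, remember the first longest run (length >= 2)
--     best = ''
--     cur = ''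
--     for c in s:
--         if c in 'aeiouAEIOU':
--             cur += c
--             if len(cur) > len(best) and len(cur) > 1:
--                 best = cur
--         else:
--             cur = ''
--     return best
-- ===== Notes on version B (the rewrite author's own statement) =====
-- stated objective: faster
-- what changed: replaced the quadratic nested index loops (restarting a scan at every vowel position and re-slicing) by a single pass over the characters that grows the current vowel run and keeps the first longest run of length >= 2
import Mathlib
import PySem

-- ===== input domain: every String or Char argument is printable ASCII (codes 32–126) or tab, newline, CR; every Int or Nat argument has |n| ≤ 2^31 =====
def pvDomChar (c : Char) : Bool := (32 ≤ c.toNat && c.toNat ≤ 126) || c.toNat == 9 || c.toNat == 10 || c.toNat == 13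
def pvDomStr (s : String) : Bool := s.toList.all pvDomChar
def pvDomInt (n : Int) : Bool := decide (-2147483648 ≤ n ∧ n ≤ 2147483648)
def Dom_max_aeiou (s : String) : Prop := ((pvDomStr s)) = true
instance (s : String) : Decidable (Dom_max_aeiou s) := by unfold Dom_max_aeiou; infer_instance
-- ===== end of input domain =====

-- B replaces A's quadratic nested index loops by one linear pass that grows the
-- current vowel run and keeps the first longest run of length ≥ 2 (objective: faster).

-- ===== PORT A =====
-- one-character membership test `c in 'aeiouAEIOU'` (shared by both ports)
def pvVowel (c : Char) : Bool := "aeiouAEIOU".toList.contains c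

-- A's inner `for j in range(i+1, len(s))` loop, with its `break`
def pvInnerA (s : String) (i : Int) (js : List Int) (result : String) : String :=
  match js with
  | [] => result
  | j :: rest =>
    match PySem.Str.pyGet? s j with
    | none => result      -- unreachable: j is drawn from range(i+1, len(s))
    | some cj =>
      if pvVowel cj then
        pvInnerA s i rest
          (if PySem.Str.len (PySem.Str.slice s (some i) (some (j + 1))) >
              PySem.Str.len result
           then PySem.Str.slice s (some i) (some (j + 1)) else result)
      else result

-- A's outer loop body
def pvOuterStep (s : String) (result : String) (i : Int) : String :=
  match PySem.Str.pyGet? s i with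
  | none => result        -- unreachable: i is drawn from range(len(s) - 1)
  | some ci =>
    if pvVowel ci then
      pvInnerA s i (PySem.List.pyRange (i + 1) (PySem.Str.len s) 1) result
    else result

def max_aeiou (s : String) : String :=
  (PySem.List.pyRange 0 (PySem.Str.len s - 1) 1).foldl (pvOuterStep s) ""

-- ===== PORT B =====
-- B's loop body: grow the current vowel run `st.2`, keep the first longest ≥ 2 in `st.1`
def pvStepB (st : String × String) (c : Char) : String × String :=
  if pvVowel c then
    let cur := st.2.push c
    if PySem.Str.len cur > PySem.Str.len st.1 ∧ PySem.Str.len cur > 1 then (cur, cur)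
    else (st.1, cur)
  else (st.1, "")

def max_aeiou_alt (s : String) : String := (s.toList.foldl pvStepB ("", "")).1

-- ===== PRECONDITION & SPEC =====
def Spec_max_aeiou (s : String) (out : String) : Prop := out = max_aeiou_alt s
instance (s : String) (out : String) : Decidable (Spec_max_aeiou s out) := by unfold Spec_max_aeiou; infer_instance

-- ===== CLAIM (what is proved, stated in full; the proofs are below) =====
def Claim_equal_max_aeiou : Prop := ∀ (s : String), Dom_max_aeiou s → Spec_max_aeiou s (max_aeiou s)

-- ===== LEMMAS AND PROOFS =====

-- common form both ports are reduced to: fold the update rule over the vowel runs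
def pvUpd (b r : List Char) : List Char :=
  if r.length > b.length ∧ 1 < r.length then r else b

-- the maximal vowel runs of cs, in order (a leading partial run included as is)
def pvRuns : List Char → List (List Char)
  | [] => []
  | c :: t =>
    if pvVowel c then (c :: t.takeWhile pvVowel) :: pvRuns (t.dropWhile pvVowel)
    else pvRuns t
termination_by cs => cs.length
decreasing_by
  · simp only [List.length_cons]
    exact Nat.lt_succ_of_le (List.length_dropWhile_le pvVowel t)
  · simp

lemma pvRuns_nil : pvRuns [] = [] := by simp [pvRuns]
lemma pvRuns_cons_pos {c : Char} {t : List Char} (h : pvVowel c = true) :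
    pvRuns (c :: t) = (c :: t.takeWhile pvVowel) :: pvRuns (t.dropWhile pvVowel) := by
  rw [pvRuns]; simp [h]
lemma pvRuns_cons_neg {c : Char} {t : List Char} (h : pvVowel c = false) :
    pvRuns (c :: t) = pvRuns t := by
  rw [pvRuns]; simp [h]

-- number of consecutive vowels of cs starting at position j
def pvQ (cs : List Char) (j : Nat) : Nat := ((cs.drop j).takeWhile pvVowel).length

lemma pvTakeWhile_eq_take (p : Char → Bool) (l : List Char) :
    l.takeWhile p = l.take (l.takeWhile p).length := by
  induction l with
  | nil => rfl
  | cons c t ih =>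
    by_cases h : p c
    · simp only [List.takeWhile_cons_of_pos h, List.length_cons, List.take_succ_cons]
      exact congrArg _ ih
    · simp [List.takeWhile_cons_of_neg h]

-- list-level mirror of B's step
def pvStepL (st : List Char × List Char) (c : Char) : List Char × List Char :=
  if pvVowel c then
    let cur := st.2 ++ [c]
    if cur.length > st.1.length ∧ 1 < cur.length then (cur, cur) else (st.1, cur)
  else (st.1, [])

lemma pvStepB_sim (b r : String) (c : Char) :
    ((pvStepB (b, r) c).1.toList, (pvStepB (b, r) c).2.toList)
      = pvStepL (b.toList, r.toList) c := by
  by_cases hv : pvVowel c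
  · simp only [pvStepB, pvStepL, hv, if_true, PySem.Str.len_eq, String.toList_push]
    split_ifs with h1 h2 h2 <;> simp_all
  · simp [pvStepB, pvStepL, hv]

lemma pvFoldB_sim : ∀ (cs : List Char) (b r : String),
    (((cs.foldl pvStepB (b, r)).1.toList, (cs.foldl pvStepB (b, r)).2.toList))
      = cs.foldl pvStepL (b.toList, r.toList) := by
  intro cs
  induction cs with
  | nil => intro b r; simp
  | cons c t ih =>
    intro b r
    rcases hs : pvStepB (b, r) c with ⟨b', r'⟩
    have h := pvStepB_sim b r c
    rw [hs] at h
    simp only [List.foldl_cons, hs, ← h]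
    exact ih b' r'

lemma pvStepL_vowels : ∀ (p : List Char), (∀ c ∈ p, pvVowel c = true) →
    ∀ b r : List Char, ¬(r.length > b.length ∧ 1 < r.length) →
    p.foldl pvStepL (b, r) = (pvUpd b (r ++ p), r ++ p) := by
  intro p
  induction p with
  | nil =>
    intro _ b r hnr
    simp [pvUpd, hnr]
  | cons c t ih =>
    intro hall b r hnr
    have hv : pvVowel c = true := hall c (List.mem_cons_self ..)
    have hstep : pvStepL (b, r) c =
        (if (r ++ [c]).length > b.length ∧ 1 < (r ++ [c]).length then ((r ++ [c]), (r ++ [c]))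
         else (b, r ++ [c])) := by
      simp [pvStepL, hv]
    have htail : ∀ c' ∈ t, pvVowel c' = true := fun c' hc' => hall c' (List.mem_cons_of_mem _ hc')
    by_cases hc : (r ++ [c]).length > b.length ∧ 1 < (r ++ [c]).length
    · rw [List.foldl_cons, hstep, if_pos hc,
        ih htail (r ++ [c]) (r ++ [c]) (by intro h; omega)]
      refine Prod.ext ?_ (by simp)
      show pvUpd (r ++ [c]) (r ++ [c] ++ t) = pvUpd b (r ++ c :: t)
      have hc' : r.length + 1 > b.length ∧ 1 < r.length + 1 := by simpa using hc
      have h4 : r ++ [c] ++ t = r ++ c :: t := by simp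
      unfold pvUpd
      rw [h4]
      cases t with
      | nil =>
        rw [if_neg (by simp), if_pos (by simp; omega)]
      | cons e t2 =>
        rw [if_pos (by simp; omega), if_pos (by simp; omega)]
    · rw [List.foldl_cons, hstep, if_neg hc, ih htail b (r ++ [c]) hc]
      refine Prod.ext ?_ (by simp)
      show pvUpd b (r ++ [c] ++ t) = pvUpd b (r ++ c :: t)
      simp [List.append_assoc]

lemma pvHeadDropWhile (p : Char → Bool) : ∀ (l : List Char) (x : Char) (xs : List Char),
    l.dropWhile p = x :: xs → p x = false := by
  intro l
  induction l with
  | nil => intro x xs h; simp [List.dropWhile] at h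
  | cons c t ih =>
    intro x xs h
    by_cases hc : p c
    · rw [List.dropWhile_cons_of_pos hc] at h; exact ih x xs h
    · rw [List.dropWhile_cons_of_neg hc] at h
      cases h; simpa using hc

lemma pvBruns : ∀ (fuel : Nat) (cs : List Char), cs.length ≤ fuel → ∀ b : List Char,
    (cs.foldl pvStepL (b, [])).1 = (pvRuns cs).foldl pvUpd b := by
  intro fuel
  induction fuel with
  | zero =>
    intro cs h b
    have : cs = [] := List.eq_nil_of_length_eq_zero (Nat.le_zero.mp h)
    subst this; simp [pvRuns_nil]
  | succ n ih =>
    intro cs h b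
    match cs with
    | [] => simp [pvRuns_nil]
    | c :: t =>
      by_cases hv : pvVowel c
      · have hall : ∀ x ∈ t.takeWhile pvVowel, pvVowel x = true := fun x hx =>
          List.mem_takeWhile_imp hx
        have ht : (t.takeWhile pvVowel) ++ (t.dropWhile pvVowel) = t :=
          List.takeWhile_append_dropWhile
        have hstep1 : pvStepL (b, []) c = (b, [c]) := by
          simp [pvStepL, hv]
        have hfold : t.foldl pvStepL (b, [c])
            = (t.dropWhile pvVowel).foldl pvStepL
                (pvUpd b (c :: t.takeWhile pvVowel), c :: t.takeWhile pvVowel) := by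
          conv_lhs => rw [← ht]
          rw [List.foldl_append,
            pvStepL_vowels (t.takeWhile pvVowel) hall b [c] (by simp)]
          simp
        rw [List.foldl_cons, hstep1, hfold, pvRuns_cons_pos hv, List.foldl_cons]
        match hq : t.dropWhile pvVowel with
        | [] => simp [pvRuns_nil]
        | d :: q' =>
          have hd : pvVowel d = false := pvHeadDropWhile pvVowel t d q' hq
          have hstep2 : pvStepL (pvUpd b (c :: t.takeWhile pvVowel), c :: t.takeWhile pvVowel) d
              = (pvUpd b (c :: t.takeWhile pvVowel), []) := by
            simp [pvStepL, hd]
          have hlen : q'.length ≤ n := by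
            have h1 : (t.dropWhile pvVowel).length ≤ t.length := List.length_dropWhile_le pvVowel t
            rw [hq] at h1
            simp only [List.length_cons] at h h1
            omega
          rw [List.foldl_cons, hstep2, pvRuns_cons_neg hd, ih q' hlen]
      · have hv' : pvVowel c = false := by simpa using hv
        have hstep : pvStepL (b, []) c = (b, []) := by
          simp [pvStepL, hv']
        have hlen : t.length ≤ n := by
          simp only [List.length_cons] at h; omega
        rw [List.foldl_cons, hstep, pvRuns_cons_neg hv', ih t hlen b]

lemma pvAlt_toList (s : String) :
    (max_aeiou_alt s).toList = (pvRuns s.toList).foldl pvUpd [] := by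
  have h := pvFoldB_sim s.toList "" ""
  have h0 : ("" : String).toList = ([] : List Char) := rfl
  rw [h0] at h
  have h1 : (max_aeiou_alt s).toList = (s.toList.foldl pvStepL ([], [])).1 := by
    unfold max_aeiou_alt
    rw [← h]
  rw [h1, pvBruns s.toList.length s.toList le_rfl]

-- ===== A side =====

lemma pvInnerA_eq (s : String) (i : Nat) : ∀ (fuel : Nat), ∀ (j : Nat),
    s.toList.length - j ≤ fuel → i < j → j ≤ s.toList.length → ∀ r : String,
    (pvInnerA s (↑i) (PySem.List.pyRange (↑j) (PySem.Str.len s) 1) r).toList =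
      if 1 ≤ pvQ s.toList j ∧ r.toList.length < j + pvQ s.toList j - i
      then (s.toList.drop i).take (j + pvQ s.toList j - i) else r.toList := by
  have hlen : PySem.Str.len s = (s.toList.length : Int) := by simp [PySem.Str.len_eq]
  intro fuel
  induction fuel with
  | zero =>
    intro j hf hij hj r
    have hjn : j = s.toList.length := by omega
    subst hjn
    rw [hlen, PySem.List.pyRange_one_eq_nil (by exact_mod_cast le_rfl)]
    have hq0 : pvQ s.toList s.toList.length = 0 := by
      unfold pvQ; rw [List.drop_length]; rfl
    rw [hq0, if_neg (by omega)]
    rfl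
  | succ m ih =>
    intro j hf hij hj r
    by_cases hjn : j < s.toList.length
    case neg =>
      have hjn' : j = s.toList.length := by omega
      subst hjn'
      rw [hlen, PySem.List.pyRange_one_eq_nil (by exact_mod_cast le_rfl)]
      have hq0 : pvQ s.toList s.toList.length = 0 := by
        unfold pvQ; rw [List.drop_length]; rfl
      rw [hq0, if_neg (by omega)]
      rfl
    case pos =>
      have hget : PySem.Str.pyGet? s ((j : Nat) : Int) = some (s.toList[j]) := by
        rw [PySem.Str.pyGet?_natCast]; exact List.getElem?_eq_getElem hjn
      have hdrop : s.toList.drop j = s.toList[j] :: s.toList.drop (j + 1) :=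
        List.drop_eq_getElem_cons hjn
      rw [hlen, PySem.List.pyRange_one_cons (by exact_mod_cast hjn)]
      by_cases hv : pvVowel (s.toList[j])
      case neg =>
        have hv' : pvVowel (s.toList[j]) = false := by simpa using hv
        have hq0 : pvQ s.toList j = 0 := by
          unfold pvQ; rw [hdrop, List.takeWhile_cons_of_neg (by simp [hv'])]; rfl
        rw [hq0, if_neg (by omega)]
        simp [pvInnerA, List.getElem?_eq_getElem hjn, hv']
      case pos =>
        have hj1 : ((j : Int) + 1) = (((j + 1 : Nat)) : Int) := by push_cast; ring
        have hq : pvQ s.toList j = pvQ s.toList (j + 1) + 1 := by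
          unfold pvQ
          rw [hdrop, List.takeWhile_cons_of_pos hv, List.length_cons]
        set q' := pvQ s.toList (j + 1) with hq'
        simp only [pvInnerA, hget, hv, if_true]
        rw [← hlen, hj1]
        set cand := PySem.Str.slice s (some (↑i)) (some (((j + 1 : Nat)) : Int)) with hcanddef
        have hcand : cand.toList = (s.toList.drop i).take (j + 1 - i) := by
          rw [hcanddef, PySem.Str.toList_slice, PySem.Chars.slice_eq_listSlice,
            PySem.List.slice_natCast]
        have hcandlen : cand.toList.length = j + 1 - i := by
          rw [hcand]; simp only [List.length_take, List.length_drop]; omega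
        -- the inner condition of A, in Nat form
        have hcond : (PySem.Str.len cand > PySem.Str.len r) ↔ (r.toList.length < j + 1 - i) := by
          simp only [PySem.Str.len_eq, hcandlen]
          exact_mod_cast Iff.rfl
        by_cases hfire : r.toList.length < j + 1 - i
        case pos =>
          rw [if_pos (hcond.mpr hfire)]
          have hIH := ih (j + 1) (by omega) (by omega) (by omega) cand
          rw [hIH]
          by_cases hq1 : 1 ≤ q'
          case pos =>
            rw [if_pos ⟨hq1, by rw [hcandlen]; omega⟩, hq,
              if_pos ⟨by omega, by omega⟩]
            congr 1
            omega
          case neg =>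
            have hq0 : q' = 0 := by omega
            rw [if_neg (by omega), hq, hq0, if_pos ⟨by omega, by omega⟩, hcand]
        case neg =>
          rw [if_neg (by rw [hcond]; exact hfire)]
          have hIH := ih (j + 1) (by omega) (by omega) (by omega) r
          rw [hIH]
          by_cases hq1 : 1 ≤ q'
          case pos =>
            by_cases hr : r.toList.length < j + 1 + q' - i
            · rw [if_pos ⟨hq1, hr⟩, hq, if_pos ⟨by omega, by omega⟩]
              congr 1
              omega
            · rw [if_neg (by omega), hq, if_neg (by omega)]
          case neg =>
            have hq0 : q' = 0 := by omega
            rw [if_neg (by omega), hq, hq0, if_neg (by omega)]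

lemma pvOuterA_eq (s : String) : ∀ (fuel : Nat), ∀ (k : Nat),
    s.toList.length - k ≤ fuel → k ≤ s.toList.length → ∀ r : String,
    ((PySem.List.pyRange (↑k) (PySem.Str.len s - 1) 1).foldl (pvOuterStep s) r).toList
      = (pvRuns (s.toList.drop k)).foldl pvUpd r.toList := by
  have hlen : PySem.Str.len s = (s.toList.length : Int) := by simp [PySem.Str.len_eq]
  intro fuel
  induction fuel with
  | zero =>
    intro k hf hk r
    have hkn : k = s.toList.length := by omega
    subst hkn
    rw [hlen, PySem.List.pyRange_one_eq_nil (by omega), List.drop_length, pvRuns_nil]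
    rfl
  | succ m ih =>
    intro k hf hk r
    by_cases hklt : (k : Int) < (s.toList.length : Int) - 1
    case neg =>
      rw [hlen, PySem.List.pyRange_one_eq_nil (by omega)]
      by_cases hkn : k < s.toList.length
      case neg =>
        have : k = s.toList.length := by omega
        subst this
        rw [List.drop_length, pvRuns_nil]
        rfl
      case pos =>
        -- k = length - 1 : the final single-character suffix never yields a run ≥ 2
        have hk1 : k + 1 = s.toList.length := by omega
        have hdrop : s.toList.drop k = [s.toList[k]] := by
          rw [List.drop_eq_getElem_cons hkn, hk1, List.drop_length]
        rw [hdrop]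
        by_cases hv : pvVowel (s.toList[k])
        · rw [pvRuns_cons_pos hv]
          simp only [List.takeWhile_nil, List.dropWhile_nil, pvRuns_nil,
            List.foldl_cons, List.foldl_nil]
          unfold pvUpd
          rw [if_neg (by simp)]
        · rw [pvRuns_cons_neg (by simpa using hv), pvRuns_nil]
          rfl
    case pos =>
      have hkn : k + 1 < s.toList.length := by omega
      have hget : PySem.Str.pyGet? s ((k : Nat) : Int) = some (s.toList[k]) := by
        rw [PySem.Str.pyGet?_natCast]; exact List.getElem?_eq_getElem (by omega)
      have hdrop : s.toList.drop k = s.toList[k] :: s.toList.drop (k + 1) :=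
        List.drop_eq_getElem_cons (by omega)
      have hk1 : ((k : Int) + 1) = (((k + 1 : Nat)) : Int) := by push_cast; ring
      rw [hlen, PySem.List.pyRange_one_cons (by exact_mod_cast hklt), List.foldl_cons]
      by_cases hv : pvVowel (s.toList[k])
      case neg =>
        have hv' : pvVowel (s.toList[k]) = false := by simpa using hv
        have hstep : pvOuterStep s r (↑k) = r := by
          simp [pvOuterStep, List.getElem?_eq_getElem (show k < s.toList.length by omega), hv']
        rw [hstep, hk1, ← hlen]
        rw [ih (k + 1) (by omega) (by omega) r, hdrop, pvRuns_cons_neg hv']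
      case pos =>
        have hstep : pvOuterStep s r (↑k)
            = pvInnerA s (↑k) (PySem.List.pyRange ((↑k) + 1) (PySem.Str.len s) 1) r := by
          simp only [pvOuterStep, hget, hv, if_true]
        rw [hstep, hk1, ← hlen]
        set r' := pvInnerA s (↑k) (PySem.List.pyRange (((k + 1 : Nat)) : Int) (PySem.Str.len s) 1) r
          with hr'def
        set q' := pvQ s.toList (k + 1) with hq'
        have hinner : r'.toList =
            if 1 ≤ q' ∧ r.toList.length < (k + 1) + q' - k
            then (s.toList.drop k).take ((k + 1) + q' - k) else r.toList := by
          rw [hr'def]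
          exact pvInnerA_eq s k s.toList.length (k + 1) (by omega) (by omega) (by omega) r
        have harith : (k + 1) + q' - k = q' + 1 := by omega
        rw [harith] at hinner
        have hq2 : (List.takeWhile pvVowel (List.drop (k + 1) s.toList)).length = q' := rfl
        have htake : (s.toList.drop k).take (q' + 1)
            = s.toList[k] :: List.takeWhile pvVowel (List.drop (k + 1) s.toList) := by
          rw [hdrop, List.take_succ_cons]
          congr 1
          rw [← hq2]
          exact (pvTakeWhile_eq_take pvVowel (s.toList.drop (k + 1))).symm
        have hr'upd : r'.toList
            = pvUpd r.toList (s.toList[k] :: List.takeWhile pvVowel (List.drop (k + 1) s.toList)) := by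
          rw [hinner]
          by_cases h1 : 1 ≤ q' ∧ r.toList.length < q' + 1
          · rw [if_pos h1, htake]
            unfold pvUpd
            rw [if_pos (by simp only [List.length_cons, hq2]; omega)]
          · rw [if_neg h1]
            unfold pvUpd
            rw [if_neg (by simp only [List.length_cons, hq2]; omega)]
        have hq'le : q' ≤ r'.toList.length := by
          rw [hr'upd]
          unfold pvUpd
          split_ifs with h
          · simp only [List.length_cons, hq2]; omega
          · simp only [List.length_cons, hq2] at h
            by_cases h0 : q' = 0 <;> omega
        rw [ih (k + 1) (by omega) (by omega) r']
        rw [hdrop, pvRuns_cons_pos hv, List.foldl_cons, ← hr'upd]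
        -- the leading (partial) run of the k+1 suffix is absorbed: it is ≤ r'
        by_cases hq0 : q' = 0
        · have htw : List.takeWhile pvVowel (List.drop (k + 1) s.toList) = [] :=
            List.length_eq_zero_iff.mp (by rw [hq2, hq0])
          have hdw : (s.toList.drop (k + 1)).dropWhile pvVowel = s.toList.drop (k + 1) := by
            conv_rhs => rw [← List.takeWhile_append_dropWhile (p := pvVowel)
              (l := s.toList.drop (k + 1))]
            rw [htw]; rfl
          rw [hdw]
        · cases hd2 : s.toList.drop (k + 1) with
          | nil =>
            exfalso
            apply hq0
            rw [← hq2, hd2]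
            rfl
          | cons d t' =>
            have hvd : pvVowel d = true := by
              by_contra hnd
              apply hq0
              rw [← hq2, hd2, List.takeWhile_cons_of_neg (by simpa using hnd)]
              rfl
            have hpartlen : (d :: t'.takeWhile pvVowel).length = q' := by
              rw [← hq2, hd2, List.takeWhile_cons_of_pos hvd]
            rw [pvRuns_cons_pos hvd, List.dropWhile_cons_of_pos hvd, List.foldl_cons]
            have habs : pvUpd r'.toList (d :: t'.takeWhile pvVowel) = r'.toList := by
              unfold pvUpd
              rw [if_neg (by rw [hpartlen]; omega)]
            rw [habs]

lemma pvA_toList (s : String) :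
    (max_aeiou s).toList = (pvRuns s.toList).foldl pvUpd [] := by
  have h := pvOuterA_eq s s.toList.length 0 (by omega) (by omega) ""
  have h0 : (((0 : Nat)) : Int) = (0 : Int) := by norm_num
  rw [h0, List.drop_zero] at h
  have h1 : ("" : String).toList = ([] : List Char) := rfl
  rw [h1] at h
  exact h

-- ===== VERDICT (by name: the statement is the Claim_ definition above) =====
theorem max_aeiou_spec : Claim_equal_max_aeiou := by
  intro s _
  unfold Spec_max_aeiou
  exact String.toList_inj.mp (by rw [pvA_toList, pvAlt_toList])
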